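-- pv_equiv track=rewrite | github.com/moneyjarrod/BOND | search_daemon/bond_search.py | _is_blocked_dir
-- ===== SOURCE A (Python) =====
-- def _is_blocked_dir(rel_parts, manifest):
--     """Check if any path component matches blocked_dirs."""
--     blocked = manifest.get('blocked_dirs', [])
--     # Check each path prefix
--     for i in range(len(rel_parts)):
--         partial = '/'.join(rel_parts[:i+1])
--         if partial in blocked:
--             return True
--         # Also check individual directory names
--         if rel_parts[i] in blocked:
--             return True
--     return False
-- ===== SOURCE B (Python) =====
-- def _is_blocked_dir(rel_parts, manifest):
--     """Check if any path component matches blocked_dirs."""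
--     blocked = manifest.get('blocked_dirs', [])
--     # Build the candidate index once: every '/'-joined prefix and every part.
--     candidates = set()
--     acc = []
--     for part in rel_parts:
--         acc.append(part)
--         candidates.add('/'.join(acc))
--         candidates.add(part)
--     # Then drive the loop over the blocked entries instead of the path.
--     for entry in blocked:
--         if entry in candidates:
--             return True
--     return False
-- ===== Notes on version B (the rewrite author's own statement) =====
-- stated objective: alternative
-- what changed: B inverts the driving loop: it builds a candidate set of all '/'-joined prefixes and individual parts in one pass over rel_parts, then scans the blocked list once for a member of that set, instead of A's per-prefix rescans of blocked.
import Mathlib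
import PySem

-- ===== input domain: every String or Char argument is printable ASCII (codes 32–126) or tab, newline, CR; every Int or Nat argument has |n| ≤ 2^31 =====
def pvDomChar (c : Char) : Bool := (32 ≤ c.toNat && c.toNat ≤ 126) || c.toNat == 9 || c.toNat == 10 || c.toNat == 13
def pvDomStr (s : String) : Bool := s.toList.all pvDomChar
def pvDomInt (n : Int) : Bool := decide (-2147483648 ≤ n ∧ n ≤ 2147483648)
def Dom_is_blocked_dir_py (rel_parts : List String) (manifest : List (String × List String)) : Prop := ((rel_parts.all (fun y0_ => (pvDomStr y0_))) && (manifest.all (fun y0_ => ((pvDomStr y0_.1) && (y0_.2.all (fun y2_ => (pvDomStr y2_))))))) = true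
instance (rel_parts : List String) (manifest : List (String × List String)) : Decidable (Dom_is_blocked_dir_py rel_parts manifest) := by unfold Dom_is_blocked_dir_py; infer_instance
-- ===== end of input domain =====

-- B builds the candidate set of all '/'-joined prefixes and parts in one pass, then scans the
-- blocked list once, instead of A's per-prefix membership rescans of blocked (alternative decomposition).

-- ===== PORT A =====
-- the 'for i in range(len(rel_parts))' loop with its two early returns
def blockedLoopA (blocked rel_parts : List String) : List Int → Bool
  | [] => false
  | i :: rest =>
    let partialStr := PySem.Str.join "/" (PySem.List.slice rel_parts none (some (i + 1)))
    if blocked.contains partialStr then true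
    else if blocked.contains (PySem.List.pyGetD rel_parts i "") then true
    else blockedLoopA blocked rel_parts rest

def is_blocked_dir_py (rel_parts : List String) (manifest : List (String × List String)) : Bool :=
  let blocked := (PySem.Dict.mk manifest).getD "blocked_dirs" []
  blockedLoopA blocked rel_parts (PySem.List.pyRange 0 rel_parts.length 1)

-- ===== PORT B =====
def is_blocked_dir_py_alt (rel_parts : List String) (manifest : List (String × List String)) : Bool :=
  let blocked := (PySem.Dict.mk manifest).getD "blocked_dirs" []
  -- one pass over rel_parts building (acc, candidates)
  let st := rel_parts.foldl
    (fun (p : List String × PySem.Set String) part =>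
      let acc := p.1 ++ [part]
      (acc, PySem.Set.add (PySem.Set.add p.2 (PySem.Str.join "/" acc)) part))
    ([], PySem.Set.empty)
  -- then one scan over blocked, stopping at the first hit
  blocked.any (fun entry => PySem.Set.contains st.2 entry)

-- ===== PRECONDITION & SPEC =====
def Spec_is_blocked_dir_py (rel_parts : List String) (manifest : List (String × List String)) (out : Bool) : Prop := out = is_blocked_dir_py_alt rel_parts manifest
instance (rel_parts : List String) (manifest : List (String × List String)) (out : Bool) : Decidable (Spec_is_blocked_dir_py rel_parts manifest out) := by unfold Spec_is_blocked_dir_py; infer_instance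

-- ===== CLAIM (what is proved, stated in full; the proofs are below) =====
def Claim_equal_is_blocked_dir_py : Prop := ∀ (rel_parts : List String) (manifest : List (String × List String)), Dom_is_blocked_dir_py rel_parts manifest → Spec_is_blocked_dir_py rel_parts manifest (is_blocked_dir_py rel_parts manifest)

-- ===== LEMMAS AND PROOFS =====

-- A's loop is an 'any' over its index list
theorem blockedLoopA_eq_any (blocked rel_parts : List String) (l : List Int) :
    blockedLoopA blocked rel_parts l =
      l.any (fun i =>
        blocked.contains (PySem.Str.join "/" (PySem.List.slice rel_parts none (some (i + 1)))) ||
        blocked.contains (PySem.List.pyGetD rel_parts i "")) := by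
  induction l with
  | nil => rfl
  | cons i rest ih =>
    simp [blockedLoopA, ih, Bool.or_assoc]

-- membership in B's candidate set
theorem mem_candidates (rel_parts : List String) (acc0 : List String) (s0 : PySem.Set String) (x : String) :
    x ∈ (rel_parts.foldl
      (fun (p : List String × PySem.Set String) part =>
        let acc := p.1 ++ [part]
        (acc, PySem.Set.add (PySem.Set.add p.2 (PySem.Str.join "/" acc)) part))
      (acc0, s0)).2 ↔
    x ∈ s0 ∨ ∃ i < rel_parts.length,
      x = PySem.Str.join "/" (acc0 ++ rel_parts.take (i + 1)) ∨ x = rel_parts.getD i "" := by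
  induction rel_parts generalizing acc0 s0 with
  | nil => simp
  | cons p rest ih =>
    simp only [List.foldl_cons]
    rw [ih]
    simp only [PySem.Set.mem_add]
    constructor
    · rintro (((hs | hjoin) | hpart) | ⟨i, hi, h⟩)
      · exact Or.inl hs
      · exact Or.inr ⟨0, by simp, Or.inl (by simpa using hjoin)⟩
      · exact Or.inr ⟨0, by simp, Or.inr (by simpa using hpart)⟩
      · refine Or.inr ⟨i + 1, by simpa using hi, ?_⟩
        rcases h with h | h
        · exact Or.inl (by simpa [List.append_assoc] using h)
        · exact Or.inr (by simpa using h)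
    · rintro (hs | ⟨i, hi, h⟩)
      · exact Or.inl (Or.inl (Or.inl hs))
      · cases i with
        | zero =>
          rcases h with h | h
          · exact Or.inl (Or.inl (Or.inr (by simpa using h)))
          · exact Or.inl (Or.inr (by simpa using h))
        | succ j =>
          refine Or.inr ⟨j, by simpa using hi, ?_⟩
          rcases h with h | h
          · exact Or.inl (by simpa [List.append_assoc] using h)
          · exact Or.inr (by simpa using h)

-- ===== VERDICT (by name: the statement is the Claim_ definition above) =====
theorem is_blocked_dir_py_spec : Claim_equal_is_blocked_dir_py := by
  intro rel_parts manifest _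
  unfold Spec_is_blocked_dir_py is_blocked_dir_py is_blocked_dir_py_alt
  set blocked := (PySem.Dict.mk manifest).getD "blocked_dirs" [] with hbl
  rw [Bool.eq_iff_iff]
  rw [blockedLoopA_eq_any]
  rw [PySem.List.pyRange_one]
  simp only [List.any_map, List.any_eq_true, List.mem_range, Function.comp,
    PySem.Set.contains_iff]
  constructor
  · rintro ⟨k, hk, hor⟩
    have hcast : ((0 : Int) + (k : Int) + 1) = ((k + 1 : Nat) : Int) := by push_cast; ring
    rw [hcast, PySem.List.slice_to_natCast] at hor
    rw [Bool.or_eq_true, List.contains_iff_mem, List.contains_iff_mem] at hor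
    simp only [zero_add, PySem.List.pyGetD_natCast] at hor
    rcases hor with h | h
    · refine ⟨_, h, ?_⟩
      rw [mem_candidates]
      exact Or.inr ⟨k, hk, Or.inl (by simp)⟩
    · refine ⟨_, h, ?_⟩
      rw [mem_candidates]
      exact Or.inr ⟨k, hk, Or.inr (by simp)⟩
  · rintro ⟨e, he, hmem⟩
    rw [mem_candidates] at hmem
    rcases hmem with h | ⟨i, hi, h⟩
    · simp at h
    · refine ⟨i, hi, ?_⟩
      have hcast : ((0 : Int) + (i : Int) + 1) = ((i + 1 : Nat) : Int) := by push_cast; ring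
      rw [hcast, PySem.List.slice_to_natCast]
      rw [Bool.or_eq_true, List.contains_iff_mem, List.contains_iff_mem]
      simp only [zero_add, PySem.List.pyGetD_natCast]
      rcases h with h | h
      · exact Or.inl (by subst h; simpa using he)
      · exact Or.inr (by subst h; simpa using he)
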